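-- pv_equiv track=rewrite | github.com/navikt/testnorge | scripts/generate_proxy_table.py | merge_consumers
-- ===== SOURCE A (Python) =====
-- def merge_consumers(app_consumers, outbound_consumers):
--     # app_consumers: list of (name,url); outbound_consumers: list of (name,cluster)
--     merged = {}
--     for name,url in app_consumers:
--         merged.setdefault(name, {'url': set(), 'cluster': set()})['url'].add(url)
--     for name,cluster in outbound_consumers:
--         merged.setdefault(name, {'url': set(), 'cluster': set()})['cluster'].add(cluster)
--     names = []
--     urls = []
--     for name in sorted(merged):
--         names.append(name)
--         url_part = []
--         if merged[name]['url']: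
--             url_part.extend(sorted(merged[name]['url']))
--         if merged[name]['cluster'] and not merged[name]['url']:
--             # if only cluster known, represent cluster marker
--             url_part.extend(sorted(merged[name]['cluster']))
--         urls.append('; '.join(url_part) if url_part else '-')
--     return ', '.join(names) if names else '-', ', '.join(urls) if urls else '-'
-- ===== SOURCE B (Python) =====
-- def merge_consumers(app_consumers, outbound_consumers):
--     names = sorted({n for n, _ in app_consumers} | {n for n, _ in outbound_consumers})
--     if not names:
--         return '-', '-'
--     def fmt(name):
--         part = sorted({u for n, u in app_consumers if n == name})
--         if not part:
--             part = sorted({c for n, c in outbound_consumers if n == name})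
--         return '; '.join(part) if part else '-'
--     return ', '.join(names), ', '.join(fmt(name) for name in names)
-- ===== Notes on version B (the rewrite author's own statement) =====
-- stated objective: alternative
-- what changed: B builds no dict: it computes the sorted distinct names first and then, for each name, collects its urls/clusters directly from the input lists with filtering set comprehensions, instead of A's single-pass dict-of-sets accumulation.
import Mathlib
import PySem

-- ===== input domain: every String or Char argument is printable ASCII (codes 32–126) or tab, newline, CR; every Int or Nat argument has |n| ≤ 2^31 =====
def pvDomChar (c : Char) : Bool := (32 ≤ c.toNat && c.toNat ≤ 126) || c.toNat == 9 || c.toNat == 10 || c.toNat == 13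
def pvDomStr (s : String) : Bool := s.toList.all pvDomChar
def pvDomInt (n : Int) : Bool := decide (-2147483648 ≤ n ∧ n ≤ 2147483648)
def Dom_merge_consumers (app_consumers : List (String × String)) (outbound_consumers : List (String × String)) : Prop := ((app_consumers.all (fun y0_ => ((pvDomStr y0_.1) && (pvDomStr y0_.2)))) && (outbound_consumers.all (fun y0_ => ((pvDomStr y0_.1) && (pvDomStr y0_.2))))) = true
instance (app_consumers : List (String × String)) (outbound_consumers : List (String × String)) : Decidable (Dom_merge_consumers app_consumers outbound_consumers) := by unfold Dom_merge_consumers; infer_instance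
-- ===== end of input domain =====

-- B replaces A's dict-of-sets accumulation by per-name filtering set comprehensions over sorted distinct names (alternative decomposition, not claimed faster).

-- ===== PORT A =====
-- merged.setdefault(name, {...})['url'].add(url) mutates the entry in place: ported as Dict.modify with default (∅, ∅).
def merge_consumers (app_consumers : List (String × String)) (outbound_consumers : List (String × String)) : String × String :=
  let merged1 : PySem.Dict String (PySem.Set String × PySem.Set String) :=
    app_consumers.foldl (fun d p => d.modify p.1 ([], []) (fun q => (PySem.Set.add q.1 p.2, q.2))) PySem.Dict.empty
  let merged : PySem.Dict String (PySem.Set String × PySem.Set String) :=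
    outbound_consumers.foldl (fun d p => d.modify p.1 ([], []) (fun q => (q.1, PySem.Set.add q.2 p.2))) merged1
  let r : List String × List String :=
    (PySem.List.sorted merged.keys (fun x => x) false).foldl
      (fun acc name =>
        let v := merged.getD name ([], [])
        let url_part : List String :=
          (if v.1 ≠ [] then PySem.List.sorted v.1 (fun x => x) false else []) ++
          (if v.2 ≠ [] ∧ v.1 = [] then PySem.List.sorted v.2 (fun x => x) false else [])
        (acc.1 ++ [name], acc.2 ++ [if url_part ≠ [] then PySem.Str.join "; " url_part else "-"]))
      ([], [])
  (if r.1 ≠ [] then PySem.Str.join ", " r.1 else "-",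
   if r.2 ≠ [] then PySem.Str.join ", " r.2 else "-")

-- ===== PORT B =====
-- per-name formatter (the inner def fmt of Source B)
def mcAltFmt (app_consumers : List (String × String)) (outbound_consumers : List (String × String)) (name : String) : String :=
  let part : List String :=
    PySem.List.sorted (PySem.Set.ofList ((app_consumers.filter (fun p => p.1 == name)).map (·.2))) (fun x => x) false
  let part : List String :=
    if part = [] then
      PySem.List.sorted (PySem.Set.ofList ((outbound_consumers.filter (fun p => p.1 == name)).map (·.2))) (fun x => x) false
    else part
  if part ≠ [] then PySem.Str.join "; " part else "-"

def merge_consumers_alt (app_consumers : List (String × String)) (outbound_consumers : List (String × String)) : String × String :=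
  let names : List String :=
    PySem.List.sorted
      (PySem.Set.union (PySem.Set.ofList (app_consumers.map (·.1))) (PySem.Set.ofList (outbound_consumers.map (·.1))))
      (fun x => x) false
  if names = [] then ("-", "-")
  else (PySem.Str.join ", " names, PySem.Str.join ", " (names.map (mcAltFmt app_consumers outbound_consumers)))

-- ===== PRECONDITION & SPEC =====
def Spec_merge_consumers (app_consumers : List (String × String)) (outbound_consumers : List (String × String)) (out : String × String) : Prop := out = merge_consumers_alt app_consumers outbound_consumers
instance (app_consumers : List (String × String)) (outbound_consumers : List (String × String)) (out : String × String) : Decidable (Spec_merge_consumers app_consumers outbound_consumers out) := by unfold Spec_merge_consumers; infer_instance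

-- ===== CLAIM (what is proved, stated in full; the proofs are below) =====
def Claim_equal_merge_consumers : Prop := ∀ (app_consumers : List (String × String)) (outbound_consumers : List (String × String)), Dom_merge_consumers app_consumers outbound_consumers → Spec_merge_consumers app_consumers outbound_consumers (merge_consumers app_consumers outbound_consumers)

-- ===== LEMMAS AND PROOFS =====

-- the first accumulation loop, read back per key
theorem mc_getD_fst (l : List (String × String)) (d : PySem.Dict String (PySem.Set String × PySem.Set String)) (name : String) :
    (l.foldl (fun d p => d.modify p.1 ([], []) (fun q => (PySem.Set.add q.1 p.2, q.2))) d).getD name ([], [])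
      = (PySem.Set.update (d.getD name ([], [])).1 ((l.filter (fun p => p.1 == name)).map (·.2)),
         (d.getD name ([], [])).2) := by
  induction l generalizing d with
  | nil => simp [PySem.Set.update]
  | cons p t ih =>
    simp only [List.foldl_cons, ih, List.filter_cons]
    by_cases h : p.1 = name
    · subst h
      simp [PySem.Dict.getD_modify_self, PySem.Set.update]
    · have hb : (p.1 == name) = false := by simpa using h
      rw [PySem.Dict.getD_modify_of_ne _ _ _ (Ne.symm h)]
      simp [hb]

-- the second accumulation loop, read back per key
theorem mc_getD_snd (l : List (String × String)) (d : PySem.Dict String (PySem.Set String × PySem.Set String)) (name : String) :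
    (l.foldl (fun d p => d.modify p.1 ([], []) (fun q => (q.1, PySem.Set.add q.2 p.2))) d).getD name ([], [])
      = ((d.getD name ([], [])).1,
         PySem.Set.update (d.getD name ([], [])).2 ((l.filter (fun p => p.1 == name)).map (·.2))) := by
  induction l generalizing d with
  | nil => simp [PySem.Set.update]
  | cons p t ih =>
    simp only [List.foldl_cons, ih, List.filter_cons]
    by_cases h : p.1 = name
    · subst h
      simp [PySem.Dict.getD_modify_self, PySem.Set.update]
    · have hb : (p.1 == name) = false := by simpa using h
      rw [PySem.Dict.getD_modify_of_ne _ _ _ (Ne.symm h)]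
      simp [hb]

-- A's final foldl over the sorted names builds (names, names.map f)
theorem mc_foldl_pair (f : String → String) (l : List String) (a b : List String) :
    (l.foldl (fun acc name => (acc.1 ++ [name], acc.2 ++ [f name])) (a, b)) = (a ++ l, b ++ l.map f) := by
  induction l generalizing a b with
  | nil => simp
  | cons x t ih => simp [ih]

theorem merge_consumers_spec : Claim_equal_merge_consumers := by
  intro app ob _
  unfold Spec_merge_consumers merge_consumers merge_consumers_alt
  simp only []
  set merged1 := app.foldl (fun d p => d.modify p.1 ([], []) (fun q => (PySem.Set.add q.1 p.2, q.2))) PySem.Dict.empty with hm1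
  set merged := ob.foldl (fun d p => d.modify p.1 ([], []) (fun q => (q.1, PySem.Set.add q.2 p.2))) merged1 with hm
  -- per-name values stored in the dict
  have hget : ∀ name, merged.getD name ([], [])
      = (PySem.Set.ofList ((app.filter (fun p => p.1 == name)).map (·.2)),
         PySem.Set.ofList ((ob.filter (fun p => p.1 == name)).map (·.2))) := by
    intro name
    rw [hm, mc_getD_snd, hm1, mc_getD_fst]
    simp [PySem.Dict.getD_empty, PySem.Set.update_nil_left]
  -- the two sorted name lists coincide
  have hkeys : merged.keys = PySem.Set.update (PySem.Set.ofList (app.map (·.1))) (ob.map (·.1)) := by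
    rw [hm, PySem.Dict.keys_foldl_modify_key, hm1, PySem.Dict.keys_foldl_modify_key]
    simp [PySem.Dict.keys_empty, PySem.Set.update_nil_left]
  have hnames : PySem.List.sorted merged.keys (fun x => x) false
      = PySem.List.sorted
          (PySem.Set.union (PySem.Set.ofList (app.map (·.1))) (PySem.Set.ofList (ob.map (·.1))))
          (fun x => x) false := by
    apply PySem.List.sorted_eq_sorted_of_perm _ _ _ (fun a b h => h)
    rw [hkeys]
    have h1 : (PySem.Set.update (PySem.Set.ofList (app.map (·.1))) (ob.map (·.1))).Nodup :=
      PySem.Set.nodup_update _ _ (PySem.Set.nodup_ofList _)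
    have h2 : (PySem.Set.union (PySem.Set.ofList (app.map (·.1))) (PySem.Set.ofList (ob.map (·.1)))).Nodup :=
      PySem.Set.nodup_union _ _ (PySem.Set.nodup_ofList _)
    rw [List.perm_ext_iff_of_nodup h1 h2]
    intro x
    simp [PySem.Set.mem_update, PySem.Set.mem_union, PySem.Set.mem_ofList]
  set names := PySem.List.sorted merged.keys (fun x => x) false with hN
  -- per-name formatting coincides
  have hfmt : ∀ name,
      (if ((if (merged.getD name ([], [])).1 ≠ [] then PySem.List.sorted (merged.getD name ([], [])).1 (fun x => x) false else []) ++
           (if (merged.getD name ([], [])).2 ≠ [] ∧ (merged.getD name ([], [])).1 = [] then PySem.List.sorted (merged.getD name ([], [])).2 (fun x => x) false else [])) ≠ []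
       then PySem.Str.join "; "
            ((if (merged.getD name ([], [])).1 ≠ [] then PySem.List.sorted (merged.getD name ([], [])).1 (fun x => x) false else []) ++
             (if (merged.getD name ([], [])).2 ≠ [] ∧ (merged.getD name ([], [])).1 = [] then PySem.List.sorted (merged.getD name ([], [])).2 (fun x => x) false else []))
       else "-")
      = mcAltFmt app ob name := by
    intro name
    rw [hget name]
    unfold mcAltFmt
    simp only []
    by_cases h1 : (PySem.Set.ofList ((app.filter (fun p => p.1 == name)).map (·.2)) : List String) = []
    · by_cases h2 : (PySem.Set.ofList ((ob.filter (fun p => p.1 == name)).map (·.2)) : List String) = []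
      · simp [h1, h2, PySem.List.sorted_eq_nil_iff]
      · simp [h1, h2, PySem.List.sorted_eq_nil_iff]
    · simp [h1, PySem.List.sorted_eq_nil_iff]
  rw [mc_foldl_pair]
  simp only [List.nil_append]
  rw [← hnames]
  by_cases hnil : names = []
  · simp [hnil]
  · have hmap : names.map (fun name =>
        if ((if (merged.getD name ([], [])).1 ≠ [] then PySem.List.sorted (merged.getD name ([], [])).1 (fun x => x) false else []) ++
            (if (merged.getD name ([], [])).2 ≠ [] ∧ (merged.getD name ([], [])).1 = [] then PySem.List.sorted (merged.getD name ([], [])).2 (fun x => x) false else [])) ≠ []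
        then PySem.Str.join "; "
             ((if (merged.getD name ([], [])).1 ≠ [] then PySem.List.sorted (merged.getD name ([], [])).1 (fun x => x) false else []) ++
              (if (merged.getD name ([], [])).2 ≠ [] ∧ (merged.getD name ([], [])).1 = [] then PySem.List.sorted (merged.getD name ([], [])).2 (fun x => x) false else []))
        else "-") = names.map (mcAltFmt app ob) :=
      List.map_congr_left (fun name _ => hfmt name)
    rw [hmap]
    simp [hnil]
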